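-- pv_equiv track=rewrite | github.com/guo-ou/6.009 | lab8B/lab.py | tokenize
-- ===== SOURCE A (Python) =====
-- def tokenize(source):
--     """
--     Splits an input string into meaningful tokens (left parens, right parens,
--     other whitespace-separated values).  Returns a list of strings.
--
--     Arguments:
--         source (str): a string containing the source code of a carlae
--                       expression
--     """
--     ## Replace special characters such that they are all separated by spaces so that
--     ## we can use _list_.split() to separate pertinent characters in the final output
--     spaced = source.replace(")", " ) ").replace("(", " ( ").replace("\n", " \n ")
--
--     ## Create individual 'clauses' for each line in a multiline statement
--     ## If there is no newline in the text, we should place the string in an empty list so that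
--     ## we can iterate through it in the next step (it is still just one clause)
--     if "\n" in spaced:
--         spaced = spaced.split("\n")
--     else:
--         spaced = [spaced]
--
--     ## Loop through the clauses and splice off the comments from each one
--     for x in range(len(spaced)):
--         if ";" in spaced[x]:
--             spaced[x] = spaced[x][:spaced[x].index(";")]
--
--     ## Rejoin all of the clauses into one string
--     spaced = "".join(spaced)
--
--     ## Split by spaces into pertinent items from the original string
--     return spaced.split()
-- ===== SOURCE B (Python) =====
-- def tokenize(source):
--     """Single-pass scanner: parens and whitespace delimit tokens; ';' starts a
--     comment that runs until the next '\n'."""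
--     tokens = []
--     buf = []
--     in_comment = False
--     for c in source:
--         if c == "\n":
--             if buf:
--                 tokens.append("".join(buf))
--                 buf = []
--             in_comment = False
--         elif in_comment:
--             continue
--         elif c == ";":
--             in_comment = True
--         elif c in "()":
--             if buf:
--                 tokens.append("".join(buf))
--                 buf = []
--             tokens.append(c)
--         elif c.isspace():
--             if buf:
--                 tokens.append("".join(buf))
--                 buf = []
--         else:
--             buf.append(c)
--     if buf:
--         tokens.append("".join(buf))
--     return tokens
-- ===== Notes on version B (the rewrite author's own statement) =====
-- stated objective: idiomatic
-- what changed: Replaced the replace/split-on-newline/comment-splice/join/split pipeline (which builds several intermediate strings and lists) by a single left-to-right character scanner with a token buffer and an in-comment flag.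
import Mathlib
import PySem

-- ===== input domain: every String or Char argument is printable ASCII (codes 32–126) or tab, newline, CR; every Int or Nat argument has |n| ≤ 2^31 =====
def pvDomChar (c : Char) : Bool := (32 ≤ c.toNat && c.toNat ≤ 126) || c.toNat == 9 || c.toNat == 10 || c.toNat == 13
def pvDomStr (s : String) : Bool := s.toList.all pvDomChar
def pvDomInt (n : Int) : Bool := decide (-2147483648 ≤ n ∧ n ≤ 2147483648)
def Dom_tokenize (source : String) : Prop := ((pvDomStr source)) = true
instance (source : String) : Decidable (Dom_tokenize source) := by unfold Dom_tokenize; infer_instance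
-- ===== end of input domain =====

-- B replaces A's replace/split/comment-splice/join/split pipeline by a single-pass
-- character scanner with a token buffer and an in-comment flag (objective: idiomatic).

-- ===== PORT A =====
-- Python's `spaced[x].index(";")` is guarded by `";" in spaced[x]`, so it never raises
-- and equals PySem.Str.find there; `.split("\n")` has a nonempty separator, so
-- PySem.Str.split? is always `some` and `.getD [spaced]` only discharges the Option.
def tokenize (source : String) : List String :=
  let spaced := PySem.Str.replace (PySem.Str.replace (PySem.Str.replace source ")" " ) ") "(" " ( ") "\n" " \n "
  let clauses :=
    if PySem.Str.isIn "\n" spaced then (PySem.Str.split? spaced "\n").getD [spaced]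
    else [spaced]
  let stripped := clauses.map (fun line =>
    if PySem.Str.isIn ";" line then PySem.Str.slice line none (some (PySem.Str.find line ";")) else line)
  PySem.Str.split₀ (PySem.Str.join "" stripped)

-- ===== PORT B =====
def tokFlush (toks : List String) (buf : List Char) : List String :=
  if buf.isEmpty then toks else toks ++ [String.ofList buf]

def tokStep (st : List String × List Char × Bool) (c : Char) : List String × List Char × Bool :=
  let (toks, buf, com) := st
  if c = '\n' then (tokFlush toks buf, [], false)
  else if com then (toks, buf, com)
  else if c = ';' then (toks, buf, true)
  else if c = '(' ∨ c = ')' then (tokFlush toks buf ++ [String.ofList [c]], [], com)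
  else if PySem.Chars.isspace c then (tokFlush toks buf, [], com)
  else (toks, buf ++ [c], com)

def tokenize_alt (source : String) : List String :=
  let st := source.toList.foldl tokStep ([], [], false)
  tokFlush st.1 st.2.1

-- ===== PRECONDITION & SPEC =====
def Spec_tokenize (source : String) (out : List String) : Prop := out = tokenize_alt source
instance (source : String) (out : List String) : Decidable (Spec_tokenize source out) := by unfold Spec_tokenize; infer_instance

-- ===== CLAIM (what is proved, stated in full; the proofs are below) =====
def Claim_equal_tokenize : Prop := ∀ (source : String), Dom_tokenize source → Spec_tokenize source (tokenize source)

-- ===== LEMMAS AND PROOFS =====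

-- per-character expansion performed by A's three replaces
def pvG (c : Char) : List Char :=
  if c = ')' then [' ', ')', ' ']
  else if c = '(' then [' ', '(', ' ']
  else if c = '\n' then [' ', '\n', ' ']
  else [c]

-- the effect of A's split-on-'\n' / cut-at-';' / join: drop comment text and newlines
def pvStrip : Bool → List Char → List Char
  | _, [] => []
  | com, c :: r =>
    if c = '\n' then pvStrip false r
    else if com then pvStrip true r
    else if c = ';' then pvStrip true r
    else c :: pvStrip false r

-- clean recursion computing Chars.splitOn · ['\n']
def pvSplitRec : List Char → List (List Char)
  | [] => [[]]
  | c :: r => if c = '\n' then [] :: pvSplitRec r else (pvSplitRec r).modifyHead (c :: ·)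

-- clean recursion computing Chars.split₀.go without the accumulator
def pvW (cur : List Char) : List Char → List (List Char)
  | [] => if cur.isEmpty then [] else [cur.reverse]
  | c :: r =>
    if PySem.Chars.isspace c then
      (if cur.isEmpty then pvW [] r else cur.reverse :: pvW [] r)
    else pvW (c :: cur) r

-- A's per-line comment cut
def pvCut (l : List Char) : List Char :=
  if PySem.Chars.isIn [';'] l then PySem.List.slice l none (some (PySem.Chars.find l [';'])) else l

lemma replace_go_single (a : Char) (new : List Char) :
    ∀ (s : List Char) (acc : List Char) (fuel : Nat), s.length ≤ fuel →
      PySem.Chars.replace.go [a] new fuel s acc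
        = acc.reverse ++ s.flatMap (fun c => if c = a then new else [c]) := by
  intro s
  induction s with
  | nil => intro acc fuel _; cases fuel <;> simp [PySem.Chars.replace.go]
  | cons c t ih =>
      intro acc fuel hf
      cases fuel with
      | zero => simp at hf
      | succ f =>
          by_cases hc : c = a
          · subst hc
            simp [PySem.Chars.replace.go, List.isPrefixOf, ih (new.reverse ++ acc) f (by simpa using hf)]
          · simp [PySem.Chars.replace.go, List.isPrefixOf, hc, Ne.symm hc,
              ih (c :: acc) f (by simpa using hf)]

lemma replace_single (a : Char) (new s : List Char) :
    PySem.Chars.replace s [a] new = s.flatMap (fun c => if c = a then new else [c]) := by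
  simpa using replace_go_single a new s [] s.length le_rfl

lemma spaced_toList (source : String) :
    (PySem.Str.replace (PySem.Str.replace (PySem.Str.replace source ")" " ) ") "(" " ( ") "\n" " \n ").toList
      = source.toList.flatMap pvG := by
  simp only [PySem.Str.replace, String.toList_ofList]
  rw [show (")" : String).toList = [')'] from rfl, show ("(" : String).toList = ['('] from rfl,
      show ("\n" : String).toList = ['\n'] from rfl,
      show (" ) " : String).toList = [' ', ')', ' '] from rfl,
      show (" ( " : String).toList = [' ', '(', ' '] from rfl,
      show (" \n " : String).toList = [' ', '\n', ' '] from rfl]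
  rw [replace_single, replace_single, replace_single, List.flatMap_assoc, List.flatMap_assoc]
  apply List.flatMap_congr
  intro c _
  by_cases h1 : c = ')'
  · subst h1; decide
  · by_cases h2 : c = '('
    · subst h2; decide
    · by_cases h3 : c = '\n'
      · subst h3; decide
      · simp [pvG, h1, h2, h3]

lemma pvSplitRec_ne_nil (l : List Char) : pvSplitRec l ≠ [] := by
  induction l with
  | nil => simp [pvSplitRec]
  | cons c r ih =>
      simp only [pvSplitRec]
      split
      · simp
      · cases h : pvSplitRec r with
        | nil => exact absurd h ih
        | cons x xs => simp

lemma splitOn_go :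
    ∀ (l : List Char) (fuel : Nat) (cur : List Char) (acc : List (List Char)), l.length < fuel →
      PySem.Chars.splitOn.go ['\n'] fuel l cur acc
        = acc.reverse ++ ((pvSplitRec l).modifyHead (cur.reverse ++ ·)) := by
  intro l
  induction l with
  | nil =>
      intro fuel cur acc hf
      cases fuel with
      | zero => omega
      | succ f => simp [PySem.Chars.splitOn.go, pvSplitRec]
  | cons c r ih =>
      intro fuel cur acc hf
      cases fuel with
      | zero => omega
      | succ f =>
          by_cases hc : c = '\n'
          · subst hc
            rw [PySem.Chars.splitOn.go]
            rw [if_pos (by simp [List.isPrefixOf])]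
            simp only [List.length_cons, List.length_nil, List.drop_succ_cons, List.drop_zero]
            rw [ih f [] (cur.reverse :: acc) (by simp at hf; omega)]
            cases h : pvSplitRec r with
            | nil => exact absurd h (pvSplitRec_ne_nil r)
            | cons x xs => simp [pvSplitRec, h]
          · rw [PySem.Chars.splitOn.go]
            rw [if_neg (by simp [List.isPrefixOf, hc, Ne.symm hc])]
            rw [ih f (c :: cur) acc (by simpa using hf)]
            cases h : pvSplitRec r with
            | nil => exact absurd h (pvSplitRec_ne_nil r)
            | cons x xs => simp [pvSplitRec, h, hc]

lemma splitOn_eq (l : List Char) : PySem.Chars.splitOn l ['\n'] = pvSplitRec l := by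
  rw [PySem.Chars.splitOn, splitOn_go l (l.length + 1) [] [] (by omega)]
  cases h : pvSplitRec l with
  | nil => exact absurd h (pvSplitRec_ne_nil l)
  | cons x xs => simp

lemma find_go_single (a : Char) :
    ∀ (l : List Char) (k : Nat),
      PySem.Chars.find.go [a] l k
        = (match PySem.List.index? l a with | none => -1 | some i => ((i + k : Nat) : Int)) := by
  intro l
  induction l with
  | nil => intro k; simp [PySem.Chars.find.go, PySem.List.index?, List.idxOf?]
  | cons c t ih =>
      intro k
      by_cases hc : c = a
      · subst hc
        rw [PySem.Chars.find.go, if_pos (by simp [List.isPrefixOf]),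
          PySem.List.index?_cons_self]
        simp
      · rw [PySem.Chars.find.go, if_neg (by simp [List.isPrefixOf, hc, Ne.symm hc]),
          ih (k + 1), PySem.List.index?_cons_of_ne t hc]
        cases h : PySem.List.index? t a with
        | none => simp
        | some i => simp; push_cast; ring

lemma find_single (a : Char) (l : List Char) :
    PySem.Chars.find l [a] = (match PySem.List.index? l a with | none => -1 | some i => (i : Int)) := by
  rw [PySem.Chars.find, find_go_single]
  cases h : PySem.List.index? l a <;> simp

lemma isIn_single (a : Char) (l : List Char) :
    PySem.Chars.isIn [a] l = (PySem.List.index? l a).isSome := by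
  rw [PySem.Chars.isIn, find_single]
  cases h : PySem.List.index? l a <;> simp

lemma pvCut_nil : pvCut [] = [] := by decide

lemma pvCut_cons_ne (c : Char) (h : List Char) (hc : c ≠ ';') : pvCut (c :: h) = c :: pvCut h := by
  rw [pvCut, pvCut, isIn_single, isIn_single, find_single, find_single,
    PySem.List.index?_cons_of_ne h hc]
  cases hi : PySem.List.index? h ';' with
  | none => simp
  | some i =>
      simp only [hi, Option.map_some, Option.isSome_some, if_pos]
      rw [PySem.List.slice_to _ (Int.natCast_nonneg _), PySem.List.slice_to _ (Int.natCast_nonneg _)]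
      simp [List.take_succ_cons]

lemma pvCut_cons_semi (h : List Char) : pvCut (';' :: h) = [] := by
  rw [pvCut, isIn_single, find_single, PySem.List.index?_cons_self]
  simp only [Option.isSome_some, if_pos]
  simp [PySem.List.slice_to _ (by omega : (0:Int) ≤ 0)]

lemma join_nil_flatten (xs : List (List Char)) : PySem.Chars.join [] xs = xs.flatten := by
  induction xs with
  | nil => rfl
  | cons x l ih =>
      cases l with
      | nil => simp [PySem.Chars.join, List.intercalate]
      | cons y t =>
          rw [PySem.Chars.join_cons_cons, ih]
          simp

lemma strip_split (s : List Char) :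
    ((pvSplitRec s).map pvCut).flatten = pvStrip false s
  ∧ (((pvSplitRec s).tail).map pvCut).flatten = pvStrip true s := by
  induction s with
  | nil => simp [pvSplitRec, pvStrip, pvCut_nil]
  | cons c r ih =>
      by_cases hc : c = '\n'
      · subst hc
        simp only [pvSplitRec, if_pos]
        constructor
        · simpa [pvCut_nil, pvStrip] using ih.1
        · simpa [pvStrip] using ih.1
      · cases h : pvSplitRec r with
        | nil => exact absurd h (pvSplitRec_ne_nil r)
        | cons x xs =>
            have h1 : ((pvSplitRec (c :: r))) = (c :: x) :: xs := by
              simp [pvSplitRec, hc, h]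
            rw [h1]
            have ih1 := ih.1; have ih2 := ih.2
            rw [h] at ih1 ih2
            simp only [List.map_cons, List.flatten_cons, List.tail_cons] at ih1 ih2 ⊢
            constructor
            · by_cases hs : c = ';'
              · subst hs
                rw [pvCut_cons_semi]
                simpa [pvStrip, hc] using ih2
              · rw [pvCut_cons_ne c x hs]
                simpa [pvStrip, hc, hs] using ih1
            · simpa [pvStrip, hc] using ih2
lemma splitRec_no_nl (l : List Char) (h : '\n' ∉ l) : pvSplitRec l = [l] := by
  induction l with
  | nil => rfl
  | cons c r ih =>
      simp only [List.mem_cons, not_or] at h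
      have hc : c ≠ '\n' := fun hh => h.1 hh.symm
      simp [pvSplitRec, hc, ih h.2]

lemma split0_go :
    ∀ (l cur : List Char) (acc : List (List Char)),
      PySem.Chars.split₀.go l cur acc = acc.reverse ++ pvW cur l := by
  intro l
  induction l with
  | nil =>
      intro cur acc
      rw [PySem.Chars.split₀.go, pvW]
      by_cases h : cur.isEmpty <;> simp [h]
  | cons c r ih =>
      intro cur acc
      rw [PySem.Chars.split₀.go, pvW]
      by_cases hs : PySem.Chars.isspace c
      · by_cases h : cur.isEmpty <;> simp [hs, h, ih]
      · simp [hs, ih]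
lemma split0_eq (l : List Char) : PySem.Chars.split₀ l = pvW [] l := by
  simpa using split0_go l [] []

lemma pvStrip_nl (com : Bool) (r : List Char) : pvStrip com ('\n' :: r) = pvStrip false r := by
  rw [pvStrip, if_pos rfl]

lemma pvStrip_true (c : Char) (r : List Char) (h1 : c ≠ '\n') :
    pvStrip true (c :: r) = pvStrip true r := by
  rw [pvStrip, if_neg h1, if_pos rfl]

lemma pvStrip_semi (r : List Char) : pvStrip false (';' :: r) = pvStrip true r := by
  rw [pvStrip, if_neg (by decide), if_neg (by simp), if_pos rfl]

lemma pvStrip_keep (c : Char) (r : List Char) (h1 : c ≠ '\n') (h2 : c ≠ ';') :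
    pvStrip false (c :: r) = c :: pvStrip false r := by
  rw [pvStrip, if_neg h1, if_neg (by simp), if_neg h2]

lemma pvW_ws (cur : List Char) (c : Char) (r : List Char) (h : PySem.Chars.isspace c = true) :
    pvW cur (c :: r) = (if cur.isEmpty then pvW [] r else cur.reverse :: pvW [] r) := by
  rw [pvW, if_pos h]

lemma pvW_word (cur : List Char) (c : Char) (r : List Char) (h : PySem.Chars.isspace c = false) :
    pvW cur (c :: r) = pvW (c :: cur) r := by
  rw [pvW, if_neg (by simp [h])]

lemma pvW_flush (buf : List Char) (t : List Char) :
    pvW buf.reverse (' ' :: t)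
      = (if buf.isEmpty then ([] : List (List Char)) else [buf]) ++ pvW [] t := by
  rw [pvW_ws _ _ _ (by decide)]
  by_cases hb : buf.isEmpty
  · simp [hb]
  · rw [if_neg (by simpa using hb), if_neg hb]
    simp

lemma tokFlush_eq (toks : List String) (buf : List Char) :
    tokFlush toks buf
      = toks ++ (if buf.isEmpty then ([] : List (List Char)) else [buf]).map String.ofList := by
  by_cases hb : buf.isEmpty <;> simp [tokFlush, hb]

lemma main_inv :
    ∀ (cs : List Char) (toks : List String) (buf : List Char) (com : Bool),
      tokFlush (cs.foldl tokStep (toks, buf, com)).1 (cs.foldl tokStep (toks, buf, com)).2.1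
        = toks ++ (pvW buf.reverse (pvStrip com (cs.flatMap pvG))).map String.ofList := by
  intro cs
  induction cs with
  | nil =>
      intro toks buf com
      by_cases hb : buf.isEmpty
      · simp [tokFlush, pvStrip, pvW, List.isEmpty_iff.mp hb]
      · simp only [List.flatMap_nil, List.foldl_nil]
        rw [tokFlush, if_neg hb, pvStrip, pvW, if_neg (by simpa using hb)]
        simp
  | cons c cs ih =>
      intro toks buf com
      simp only [List.flatMap_cons, List.foldl_cons]
      by_cases h1 : c = '\n'
      · subst h1
        rw [show tokStep (toks, buf, com) '\n' = (tokFlush toks buf, [], false) from by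
          simp [tokStep]]
        rw [ih, show pvG '\n' = [' ', '\n', ' '] from by decide]
        simp only [List.cons_append, List.nil_append]
        cases com
        · rw [pvStrip_keep _ _ (by decide) (by decide), pvStrip_nl,
            pvStrip_keep _ _ (by decide) (by decide), pvW_flush,
            pvW_ws _ _ _ (by decide), tokFlush_eq]
          simp
        · rw [pvStrip_true _ _ (by decide), pvStrip_nl,
            pvStrip_keep _ _ (by decide) (by decide), pvW_flush, tokFlush_eq]
          simp
      · cases com with
        | true =>
            rw [show tokStep (toks, buf, true) c = (toks, buf, true) from by
              simp [tokStep, h1]]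
            rw [ih]
            congr 3
            by_cases h2 : c = ')'
            · subst h2
              rw [show pvG ')' = [' ', ')', ' '] from by decide]
              simp only [List.cons_append, List.nil_append]
              rw [pvStrip_true _ _ (by decide), pvStrip_true _ _ (by decide),
                pvStrip_true _ _ (by decide)]
            · by_cases h3 : c = '('
              · subst h3
                rw [show pvG '(' = [' ', '(', ' '] from by decide]
                simp only [List.cons_append, List.nil_append]
                rw [pvStrip_true _ _ (by decide), pvStrip_true _ _ (by decide),
                  pvStrip_true _ _ (by decide)]
              · rw [pvG, if_neg h2, if_neg h3, if_neg h1, List.singleton_append,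
                  pvStrip_true _ _ h1]
        | false =>
            by_cases h2 : c = ';'
            · subst h2
              rw [show tokStep (toks, buf, false) ';' = (toks, buf, true) from by
                simp [tokStep]]
              rw [ih]
              rw [show pvG ';' = [';'] from by decide, List.singleton_append, pvStrip_semi]
            · by_cases h3 : c = '(' ∨ c = ')'
              · rw [show tokStep (toks, buf, false) c
                    = (tokFlush toks buf ++ [String.ofList [c]], [], false) from by
                  simp [tokStep, h1, h2, h3]]
                rw [ih]
                have hG : pvG c = [' ', c, ' '] := by
                  rcases h3 with h3 | h3 <;> subst h3 <;> decide
                have hcs : PySem.Chars.isspace c = false := by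
                  rcases h3 with h3 | h3 <;> subst h3 <;> decide
                have hc2 : c ≠ ';' := h2
                rw [hG]
                simp only [List.cons_append, List.nil_append]
                rw [pvStrip_keep _ _ (by decide) (by decide),
                  pvStrip_keep _ _ h1 hc2,
                  pvStrip_keep _ _ (by decide) (by decide),
                  pvW_flush, pvW_word _ _ _ hcs, pvW_ws _ _ _ (by decide)]
                simp only [List.isEmpty_cons, List.reverse_cons, List.reverse_nil,
                  List.nil_append, Bool.false_eq_true, if_false]
                rw [tokFlush_eq]
                simp
              · rw [not_or] at h3
                by_cases h4 : PySem.Chars.isspace c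
                · rw [show tokStep (toks, buf, false) c = (tokFlush toks buf, [], false) from by
                    simp [tokStep, h1, h2, h3.1, h3.2, h4]]
                  rw [ih, pvG, if_neg h3.2, if_neg h3.1, if_neg h1, List.singleton_append,
                    pvStrip_keep _ _ h1 h2, pvW_ws _ _ _ h4]
                  by_cases hb : buf.isEmpty
                  · rw [if_pos (by simpa using hb), tokFlush_eq, if_pos hb]
                    simp
                  · rw [if_neg (by simpa using hb), tokFlush_eq, if_neg hb]
                    simp
                · rw [show tokStep (toks, buf, false) c = (toks, buf ++ [c], false) from by
                    simp [tokStep, h1, h2, h3.1, h3.2, h4]]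
                  rw [ih, pvG, if_neg h3.2, if_neg h3.1, if_neg h1, List.singleton_append,
                    pvStrip_keep _ _ h1 h2, pvW_word _ _ _ (by simpa using h4)]
                  simp

lemma strCut_eq (l : List Char) :
    (if PySem.Str.isIn ";" (String.ofList l) then
        PySem.Str.slice (String.ofList l) none (some (PySem.Str.find (String.ofList l) ";"))
      else String.ofList l)
      = String.ofList (pvCut l) := by
  rw [pvCut]
  rw [show PySem.Str.isIn ";" (String.ofList l) = PySem.Chars.isIn [';'] l from by
    simp [PySem.Str.isIn]]
  by_cases h : PySem.Chars.isIn [';'] l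
  · rw [if_pos h, if_pos h]
    rw [PySem.Str.slice, PySem.Str.find]
    simp [PySem.Chars.slice_eq_listSlice]
  · rw [if_neg h, if_neg (by simpa using h)]

lemma pipeline (S : String) :
    PySem.Str.split₀ (PySem.Str.join ""
        ((if PySem.Str.isIn "\n" S then (PySem.Str.split? S "\n").getD [S] else [S]).map
          (fun line => if PySem.Str.isIn ";" line then
              PySem.Str.slice line none (some (PySem.Str.find line ";")) else line)))
      = (pvW [] (pvStrip false S.toList)).map String.ofList := by
  have hclauses : (if PySem.Str.isIn "\n" S then (PySem.Str.split? S "\n").getD [S] else [S])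
      = (pvSplitRec S.toList).map String.ofList := by
    by_cases h : PySem.Str.isIn "\n" S
    · rw [if_pos h,
        show PySem.Str.split? S "\n"
          = some ((PySem.Chars.splitOn S.toList ['\n']).map String.ofList) from by
        simp [PySem.Str.split?, PySem.Chars.split?]]
      rw [splitOn_eq]
      rfl
    · rw [if_neg h]
      have hnl : '\n' ∉ S.toList := by
        have h' : PySem.Chars.isIn ['\n'] S.toList = false := by
          rw [PySem.Str.isIn] at h
          simpa using eq_false_of_ne_true (by simpa using h)
        rw [isIn_single] at h'
        exact (PySem.List.index?_eq_none_iff _ _).mp (Option.not_isSome_iff_eq_none.mp (by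
          intro hs; rw [h'] at hs; exact Bool.false_ne_true hs))
      rw [splitRec_no_nl _ hnl]
      simp
  rw [hclauses, List.map_map]
  have hcutmap : ((pvSplitRec S.toList).map
        ((fun line => if PySem.Str.isIn ";" line then
            PySem.Str.slice line none (some (PySem.Str.find line ";")) else line) ∘ String.ofList))
      = ((pvSplitRec S.toList).map pvCut).map String.ofList := by
    rw [List.map_map]
    apply List.map_congr_left
    intro l _
    exact strCut_eq l
  rw [hcutmap]
  rw [PySem.Str.split₀,
    show (PySem.Str.join "" (((pvSplitRec S.toList).map pvCut).map String.ofList)).toList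
      = PySem.Chars.join [] ((pvSplitRec S.toList).map pvCut) from by
    simp [PySem.Str.join, Function.comp_def]]
  rw [join_nil_flatten, (strip_split S.toList).1, split0_eq]

lemma tokenize_eq (source : String) :
    tokenize source = (pvW [] (pvStrip false (source.toList.flatMap pvG))).map String.ofList := by
  unfold tokenize
  rw [pipeline, spaced_toList]

lemma tokenize_alt_eq (source : String) :
    tokenize_alt source = (pvW [] (pvStrip false (source.toList.flatMap pvG))).map String.ofList := by
  have := main_inv source.toList [] [] false
  simpa [tokenize_alt] using this

-- ===== VERDICT (by name: the statement is the Claim_ definition above) =====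
theorem tokenize_spec : Claim_equal_tokenize := by
  intro source _
  unfold Spec_tokenize
  rw [tokenize_eq, tokenize_alt_eq]
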